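-- pv_equiv track=rewrite | github.com/paiml/depyler | examples/hard_skyline_problem.py | count_height_changes
-- ===== SOURCE A (Python) =====
-- def count_height_changes(heights: list[int]) -> int:
--     """Count number of times the height changes in a skyline profile."""
--     if len(heights) == 0:
--         return 0
--     changes: int = 1
--     i: int = 1
--     while i < len(heights):
--         if heights[i] != heights[i - 1]:
--             changes = changes + 1
--         i = i + 1
--     return changes
-- ===== SOURCE B (Python) =====
-- def count_height_changes(heights: list[int]) -> int:
--     """Number of maximal runs of equal heights (= changes + 1; 0 for empty)."""
--     runs = 0
--     i = 0
--     n = len(heights)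
--     while i < n:
--         runs += 1
--         h = heights[i]
--         i += 1
--         while i < n and heights[i] == h:
--             i += 1
--     return runs
-- ===== Notes on version B (the rewrite author's own statement) =====
-- stated objective: alternative
-- what changed: B counts maximal runs of equal heights with a nested skip loop (one outer iteration per run, the inner loop jumps past the whole run), instead of A's single index loop that tests every adjacent pair and increments a change counter; runs = changes + 1 and the empty list needs no guard.
import Mathlib
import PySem

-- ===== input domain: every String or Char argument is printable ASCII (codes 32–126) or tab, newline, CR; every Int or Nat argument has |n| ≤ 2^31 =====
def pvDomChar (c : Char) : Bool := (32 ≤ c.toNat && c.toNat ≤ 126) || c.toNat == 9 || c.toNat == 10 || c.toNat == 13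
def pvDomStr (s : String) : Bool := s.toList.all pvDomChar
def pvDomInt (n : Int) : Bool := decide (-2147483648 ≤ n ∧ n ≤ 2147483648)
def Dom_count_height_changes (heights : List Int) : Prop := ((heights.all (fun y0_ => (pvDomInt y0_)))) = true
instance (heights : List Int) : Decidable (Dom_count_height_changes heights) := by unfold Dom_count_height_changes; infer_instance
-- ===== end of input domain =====

-- B counts maximal runs of equal heights with a nested skip loop (one step per run,
-- the inner loop jumping past the run) instead of A's per-index adjacent-pair test
-- with a change counter; same cost, different decomposition.

-- ===== PORT A =====
-- A's 'while i < len: …; i += 1' starting at i = 1 is transcribed as a fold over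
-- pyRange 1 len; the in-range subscripts heights[i], heights[i-1] use pyGetD (exact here).
def count_height_changes (heights : List Int) : Int :=
  if heights.length = 0 then 0
  else
    (PySem.List.pyRange 1 (heights.length : Int) 1).foldl
      (fun changes i =>
        if PySem.List.pyGetD heights i 0 ≠ PySem.List.pyGetD heights (i - 1) 0 then
          changes + 1
        else changes) 1

-- ===== PORT B =====
-- Source B's outer while makes one step per maximal run (runs += 1), and its inner
-- 'while i < n and heights[i] == h: i += 1' skips the rest of that run: here one
-- recursive step per run, with dropWhile (· == a) as the inner skip loop.
def count_height_changes_alt (heights : List Int) : Int :=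
  match heights with
  | [] => 0
  | a :: t => 1 + count_height_changes_alt (t.dropWhile (· == a))
termination_by heights.length
decreasing_by
  simpa using Nat.lt_succ_of_le (List.length_dropWhile_le _ _)

-- ===== PRECONDITION & SPEC =====
def Spec_count_height_changes (heights : List Int) (out : Int) : Prop := out = count_height_changes_alt heights
instance (heights : List Int) (out : Int) : Decidable (Spec_count_height_changes heights out) := by unfold Spec_count_height_changes; infer_instance

-- ===== CLAIM (what is proved, stated in full; the proofs are below) =====
def Claim_equal_count_height_changes : Prop := ∀ (heights : List Int), Dom_count_height_changes heights → Spec_count_height_changes heights (count_height_changes heights)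

-- ===== LEMMAS AND PROOFS =====

-- number of adjacent unequal pairs in a :: t
def pairChanges (a : Int) : List Int → Int
  | [] => 0
  | b :: t => (if b ≠ a then 1 else 0) + pairChanges b t

lemma pyGetD_cons_shift (a : Int) (t : List Int) (i : Int) (h1 : 1 ≤ i)
    (h2 : i < (t.length : Int) + 1) :
    PySem.List.pyGetD (a :: t) i 0 = PySem.List.pyGetD t (i - 1) 0 := by
  rw [PySem.List.pyGetD_eq_getElem (a :: t) 0 (by omega)
        (by simp only [List.length_cons]; push_cast; omega),
      PySem.List.pyGetD_eq_getElem t 0 (by omega) (by omega)]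
  have hnat : i.toNat = (i - 1).toNat + 1 := by omega
  simp only [hnat, List.getElem_cons_succ]

lemma foldA (t : List Int) : ∀ (a ch : Int),
    (PySem.List.pyRange 1 (((a :: t).length : Int)) 1).foldl
      (fun changes i =>
        if PySem.List.pyGetD (a :: t) i 0 ≠ PySem.List.pyGetD (a :: t) (i - 1) 0 then
          changes + 1
        else changes) ch = ch + pairChanges a t := by
  induction t with
  | nil =>
    intro a ch
    rw [PySem.List.pyRange_one_eq_nil (by simp)]
    simp [pairChanges]
  | cons b t' ih =>
    intro a ch
    have hlen : (((a :: b :: t').length : Int)) = (t'.length : Int) + 2 := by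
      push_cast [List.length_cons]; ring
    rw [hlen, PySem.List.pyRange_one_cons (by omega)]
    simp only [List.foldl_cons]
    have h1 : PySem.List.pyGetD (a :: b :: t') 1 0 = b := by
      rw [PySem.List.pyGetD_eq_getElem (a :: b :: t') 0 (by omega) (by simp only [List.length_cons]; push_cast; omega)]
      simp
    have h0 : PySem.List.pyGetD (a :: b :: t') (1 - 1) 0 = a := by
      norm_num [PySem.List.pyGetD_zero_cons]
    rw [h1, h0]
    -- shift the remaining range down by one onto the tail b :: t'
    have hshift : ∀ ch' : Int,
        (PySem.List.pyRange (1 + 1) ((t'.length : Int) + 2) 1).foldl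
          (fun changes i =>
            if PySem.List.pyGetD (a :: b :: t') i 0 ≠ PySem.List.pyGetD (a :: b :: t') (i - 1) 0 then
              changes + 1
            else changes) ch' =
        (PySem.List.pyRange 1 ((t'.length : Int) + 1) 1).foldl
          (fun changes i =>
            if PySem.List.pyGetD (b :: t') i 0 ≠ PySem.List.pyGetD (b :: t') (i - 1) 0 then
              changes + 1
            else changes) ch' := by
      intro ch'
      rw [PySem.List.pyRange_one, PySem.List.pyRange_one]
      have hn : ((t'.length : Int) + 2 - (1 + 1)).toNat = ((t'.length : Int) + 1 - 1).toNat := by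
        omega
      rw [hn, List.foldl_map, List.foldl_map]
      apply List.foldl_ext
      intro c k hk
      have hk' : (k : Int) < (t'.length : Int) := by
        have h := List.mem_range.mp hk
        have h2 : ((t'.length : Int) + 1 - 1).toNat = t'.length := by omega
        rw [h2] at h
        exact_mod_cast h
      have e1 : PySem.List.pyGetD (a :: b :: t') (1 + 1 + (k : Int)) 0
          = PySem.List.pyGetD (b :: t') (1 + (k : Int)) 0 := by
        rw [pyGetD_cons_shift a (b :: t') _ (by omega) (by simp only [List.length_cons]; push_cast; omega)]
        ring_nf
      have e2 : PySem.List.pyGetD (a :: b :: t') (1 + 1 + (k : Int) - 1) 0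
          = PySem.List.pyGetD (b :: t') (1 + (k : Int) - 1) 0 := by
        rw [pyGetD_cons_shift a (b :: t') _ (by omega) (by simp only [List.length_cons]; push_cast; omega)]
        ring_nf
      rw [e1, e2]
    rw [hshift]
    have hih := ih b (if b ≠ a then ch + 1 else ch)
    have hcast : (((b :: t').length : Int)) = (t'.length : Int) + 1 := by
      push_cast [List.length_cons]; ring
    rw [hcast] at hih
    rw [hih, pairChanges]
    split_ifs <;> ring

lemma pairChanges_dropWhile (t : List Int) : ∀ a,
    pairChanges a (t.dropWhile (· == a)) = pairChanges a t := by
  induction t with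
  | nil => intro a; simp
  | cons b t' ih =>
    intro a
    by_cases h : b = a
    · subst h
      rw [List.dropWhile_cons_of_pos (by simp), ih b]
      simp [pairChanges]
    · rw [List.dropWhile_cons_of_neg (by simpa using h)]

lemma alt_cons : ∀ (n : Nat) (t : List Int) (a : Int), t.length ≤ n →
    count_height_changes_alt (a :: t) = 1 + pairChanges a t := by
  intro n
  induction n with
  | zero =>
    intro t a h
    have ht : t = [] := List.eq_nil_of_length_eq_zero (Nat.le_zero.mp h)
    subst ht
    simp [count_height_changes_alt, pairChanges]
  | succ n ih =>
    intro t a h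
    rw [count_height_changes_alt, ← pairChanges_dropWhile t a]
    cases hs : t.dropWhile (· == a) with
    | nil => simp [count_height_changes_alt, pairChanges]
    | cons c s' =>
      have hca : (c == a) = false := by
        have hh := List.head_dropWhile_not (· == a) (l := t) (by rw [hs]; simp)
        simp only [hs, List.head_cons] at hh
        exact hh
      have hlen : s'.length ≤ n := by
        have := List.length_dropWhile_le (· == a) t
        rw [hs] at this
        simp only [List.length_cons] at this
        omega
      rw [ih s' c hlen, pairChanges]
      have hca' : c ≠ a := by simpa using hca
      simp only [hca', ne_eq, not_false_eq_true, if_true]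

-- ===== VERDICT (by name: the statement is the Claim_ definition above) =====
theorem count_height_changes_spec : Claim_equal_count_height_changes := by
  intro heights _
  unfold Spec_count_height_changes count_height_changes
  cases heights with
  | nil => simp [count_height_changes_alt]
  | cons a t =>
    rw [if_neg (by simp)]
    rw [foldA t a 1, alt_cons t.length t a le_rfl]
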